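-- pv_equiv track=rewrite | github.com/MSR-2023/VRL4CCD | nets/siamese.py | get_img_output_length
-- ===== SOURCE A (Python) =====
-- def get_img_output_length(width, height):
--     def get_output_length(input_length):
--         # input_length += 6
--         filter_sizes = [2, 2, 2, 2, 2]
--         padding = [0, 0, 0, 0, 0]
--         stride = 2
--         for i in range(5):
--             input_length = (input_length + 2 * padding[i] - filter_sizes[i]) // stride + 1
--         return input_length
--     return get_output_length(width) * get_output_length(height)
-- ===== SOURCE B (Python) =====
-- def get_img_output_length(width, height):
--     # Five conv layers with filter 2, padding 0, stride 2 each halve the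
--     # length: (L - 2)//2 + 1 == L//2, so five of them are a single L//32.
--     return (width // 32) * (height // 32)
-- ===== Notes on version B (the rewrite author's own statement) =====
-- stated objective: simpler
-- what changed: Replaced the inner helper with its 5-iteration loop over filter/padding lists by the closed form (width // 32) * (height // 32), since each iteration is exactly a floor halving.
import Mathlib
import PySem

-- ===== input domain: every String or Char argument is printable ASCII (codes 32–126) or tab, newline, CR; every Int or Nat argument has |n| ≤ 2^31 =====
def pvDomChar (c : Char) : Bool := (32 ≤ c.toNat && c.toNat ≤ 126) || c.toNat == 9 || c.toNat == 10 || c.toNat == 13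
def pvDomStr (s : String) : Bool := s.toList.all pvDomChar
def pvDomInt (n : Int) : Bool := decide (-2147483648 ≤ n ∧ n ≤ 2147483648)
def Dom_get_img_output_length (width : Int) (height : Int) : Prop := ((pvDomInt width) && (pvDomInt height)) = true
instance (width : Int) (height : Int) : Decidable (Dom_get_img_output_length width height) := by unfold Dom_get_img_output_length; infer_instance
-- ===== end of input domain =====

-- B replaces A's five-iteration halving loop by the closed form (w // 32) * (h // 32); objective: simpler.

-- ===== PORT A =====
-- inner helper get_output_length of A, transliterated
def pvGetOutputLength (input_length : Int) : Int :=
  let filter_sizes : List Int := [2, 2, 2, 2, 2]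
  let padding : List Int := [0, 0, 0, 0, 0]
  let stride : Int := 2
  (PySem.List.pyRange 0 5 1).foldl
    (fun L i =>
      PySem.Int.floordiv (L + 2 * PySem.List.pyGetD padding i 0 - PySem.List.pyGetD filter_sizes i 0) stride + 1)
    input_length

def get_img_output_length (width : Int) (height : Int) : Int :=
  pvGetOutputLength width * pvGetOutputLength height

-- ===== PORT B =====
def get_img_output_length_alt (width : Int) (height : Int) : Int :=
  PySem.Int.floordiv width 32 * PySem.Int.floordiv height 32

-- ===== PRECONDITION & SPEC =====
def Spec_get_img_output_length (width : Int) (height : Int) (out : Int) : Prop := out = get_img_output_length_alt width height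
instance (width : Int) (height : Int) (out : Int) : Decidable (Spec_get_img_output_length width height out) := by unfold Spec_get_img_output_length; infer_instance

-- ===== CLAIM (what is proved, stated in full; the proofs are below) =====
def Claim_equal_get_img_output_length : Prop := ∀ (width : Int) (height : Int), Dom_get_img_output_length width height → Spec_get_img_output_length width height (get_img_output_length width height)

-- ===== LEMMAS AND PROOFS =====
-- five halvings compose to one floor division by 32
theorem pvGetOutputLength_eq (L : Int) : pvGetOutputLength L = PySem.Int.floordiv L 32 := by
  have h2 : (0:Int) < 2 := by norm_num
  have h32 : (0:Int) < 32 := by norm_num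
  have hr : PySem.List.pyRange 0 5 1 = [0, 1, 2, 3, 4] := by rfl
  simp only [pvGetOutputLength, hr, PySem.Int.floordiv_eq_ediv_of_pos h2,
    PySem.Int.floordiv_eq_ediv_of_pos h32]
  norm_num [PySem.List.pyGetD, PySem.List.pyGet?, PySem.List.pyIdx?, show ((2:Int).toNat)=2 from rfl, show ((3:Int).toNat)=3 from rfl, show ((4:Int).toNat)=4 from rfl]
  omega

-- ===== VERDICT (by name: the statement is the Claim_ definition above) =====
theorem get_img_output_length_spec : Claim_equal_get_img_output_length := by
  intro w h _
  unfold Spec_get_img_output_length get_img_output_length get_img_output_length_alt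
  rw [pvGetOutputLength_eq, pvGetOutputLength_eq]
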